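-- pv_equiv track=rewrite | github.com/AxelBlazerGit/DSA | GfG/easy/Array Duplicates.py | duplicates
-- ===== SOURCE A (Python) =====
-- from typing import List
--
-- def duplicates(n : int, arr : List[int]) -> List[int]:
--     # code here
--     dupes=set()
--     ans=set()
--     for i in arr:
--         if i not in dupes:
--             dupes.add(i)
--         else:
--             ans.add(i)
--     if not ans:
--         return [-1]
--     return sorted(list(ans))
-- ===== SOURCE B (Python) =====
-- from typing import List
--
-- def duplicates(n : int, arr : List[int]) -> List[int]:
--     # Sort first, then one adjacent-pair scan: equal neighbours mark a duplicate,
--     # and a run of equals is emitted once by comparing with the last emitted value.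
--     s = sorted(arr)
--     res = []
--     for prev, cur in zip(s, s[1:]):
--         if prev == cur and (not res or res[-1] != cur):
--             res.append(cur)
--     return res if res else [-1]
-- ===== Notes on version B (the rewrite author's own statement) =====
-- stated objective: alternative
-- what changed: Replaces the hash-set membership pass by sort-then-adjacent-scan: the array is sorted first and duplicates are detected by comparing neighbouring elements, deduplicated against the last emitted value, so no set/dict is used at all and the output needs no final sort.
import Mathlib
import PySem

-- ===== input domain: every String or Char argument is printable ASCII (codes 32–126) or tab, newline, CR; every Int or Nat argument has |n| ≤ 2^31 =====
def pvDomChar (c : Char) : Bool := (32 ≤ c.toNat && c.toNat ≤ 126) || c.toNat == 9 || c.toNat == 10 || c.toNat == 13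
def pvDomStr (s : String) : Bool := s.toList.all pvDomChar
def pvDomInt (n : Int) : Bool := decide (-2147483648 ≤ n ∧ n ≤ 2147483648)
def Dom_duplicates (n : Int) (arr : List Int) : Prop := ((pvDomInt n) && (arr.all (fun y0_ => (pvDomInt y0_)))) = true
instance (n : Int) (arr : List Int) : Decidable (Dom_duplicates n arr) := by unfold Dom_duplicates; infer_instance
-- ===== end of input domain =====

-- B replaces A's two-set membership pass by sort-then-adjacent-scan (no hash structure at
-- all): sort the array, detect duplicates by comparing neighbouring elements, deduplicate
-- a run by comparing against the last emitted value. Equality of return values is proved.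

-- ===== PORT A =====
-- the body of A's for-loop: 'if i not in dupes: dupes.add(i) else: ans.add(i)'
def dupStep (p : PySem.Set Int × PySem.Set Int) (i : Int) : PySem.Set Int × PySem.Set Int :=
  if ¬ PySem.Set.contains p.1 i then (PySem.Set.add p.1 i, p.2) else (p.1, PySem.Set.add p.2 i)

def duplicates (n : Int) (arr : List Int) : List Int :=
  let st := arr.foldl dupStep (PySem.Set.empty, PySem.Set.empty)
  if st.2 = [] then [-1] else PySem.List.sorted st.2 (fun x => x) false

-- ===== PORT B =====
-- 'not res or res[-1] != cur' is ported as res.getLast? ≠ some cur (true on empty res)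
def dupScanStep (res : List Int) (p : Int × Int) : List Int :=
  if p.1 = p.2 ∧ res.getLast? ≠ some p.2 then res ++ [p.2] else res

def duplicates_alt (n : Int) (arr : List Int) : List Int :=
  let s := PySem.List.sorted arr (fun x => x) false
  let res := (s.zip (PySem.List.slice s (some 1) none)).foldl dupScanStep []
  if res = [] then [-1] else res

-- ===== PRECONDITION & SPEC =====
def Spec_duplicates (n : Int) (arr : List Int) (out : List Int) : Prop := out = duplicates_alt n arr
instance (n : Int) (arr : List Int) (out : List Int) : Decidable (Spec_duplicates n arr out) := by unfold Spec_duplicates; infer_instance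

-- ===== CLAIM (what is proved, stated in full; the proofs are below) =====
def Claim_equal_duplicates : Prop := ∀ (n : Int) (arr : List Int), Dom_duplicates n arr → Spec_duplicates n arr (duplicates n arr)

-- ===== LEMMAS AND PROOFS =====

-- A's loop invariant: the 'ans' component stays nodup, and its members are exactly the old
-- members of 'a' plus the elements of l that were already in 'd' or occur at least twice in l.
theorem dupA_loop_inv (l : List Int) (d a : PySem.Set Int) (ha : a.Nodup) :
    (l.foldl dupStep (d, a)).2.Nodup ∧
    ∀ x, x ∈ (l.foldl dupStep (d, a)).2 ↔ x ∈ a ∨ (x ∈ l ∧ (x ∈ d ∨ 2 ≤ l.count x)) := by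
  induction l generalizing d a with
  | nil => exact ⟨ha, fun x => by simp⟩
  | cons i t ih =>
    rw [List.foldl_cons]
    by_cases hc : PySem.Set.contains d i = true
    · have hid : i ∈ d := (PySem.Set.contains_iff d i).mp hc
      have hstep : dupStep (d, a) i = (d, PySem.Set.add a i) := by
        unfold dupStep; exact if_neg (not_not_intro hc)
      rw [hstep]
      obtain ⟨hn, hm⟩ := ih d (PySem.Set.add a i) (PySem.Set.nodup_add a i ha)
      refine ⟨hn, fun x => ?_⟩
      rw [hm x, PySem.Set.mem_add]
      by_cases hxi : x = i
      · subst hxi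
        simp [hid]
      · have hcnt : List.count x (i :: t) = List.count x t := by
          simp [Ne.symm hxi]
        simp only [List.mem_cons, hxi, false_or, or_false, hcnt]
    · have hid : i ∉ d := fun h => hc ((PySem.Set.contains_iff d i).mpr h)
      have hstep : dupStep (d, a) i = (PySem.Set.add d i, a) := by
        unfold dupStep; exact if_pos hc
      rw [hstep]
      obtain ⟨hn, hm⟩ := ih (PySem.Set.add d i) a ha
      refine ⟨hn, fun x => ?_⟩
      rw [hm x]
      by_cases hxi : x = i
      · subst hxi
        have hcnt : List.count x (x :: t) = List.count x t + 1 := by simp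
        constructor
        · rintro (h | ⟨hxt, _⟩)
          · exact Or.inl h
          · refine Or.inr ⟨List.mem_cons_self .., Or.inr ?_⟩
            have := List.count_pos_iff.mpr hxt
            omega
        · rintro (h | ⟨_, hcase⟩)
          · exact Or.inl h
          · rcases hcase with hd | h2
            · exact absurd hd hid
            · rw [hcnt] at h2
              have hxt : x ∈ t := List.count_pos_iff.mp (by omega)
              exact Or.inr ⟨hxt, Or.inl ((PySem.Set.mem_add d x x).mpr (Or.inr rfl))⟩
      · have hcnt : List.count x (i :: t) = List.count x t := by
          simp [Ne.symm hxi]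
        have hmem : x ∈ PySem.Set.add d i ↔ x ∈ d := by
          rw [PySem.Set.mem_add]; simp [hxi]
        simp only [List.mem_cons, hxi, false_or, hcnt, hmem]

-- B's scan invariant over a sorted (Pairwise ≤) list, generalising the accumulator:
-- the result stays strictly increasing and collects res plus the values occurring ≥ 2 times.
theorem dupB_scan_inv (s : List Int) (a : Int) (res : List Int)
    (hs : (a :: s).Pairwise (· ≤ ·)) (hr : res.Pairwise (· < ·)) (hub : ∀ y ∈ res, y ≤ a) :
    (((a :: s).zip s).foldl dupScanStep res).Pairwise (· < ·) ∧
    (∀ y ∈ ((a :: s).zip s).foldl dupScanStep res, y ≤ (a :: s).getLast (by simp)) ∧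
    ∀ x, x ∈ ((a :: s).zip s).foldl dupScanStep res ↔ x ∈ res ∨ 2 ≤ (a :: s).count x := by
  induction s generalizing a res with
  | nil =>
    refine ⟨hr, fun y hy => by simpa using hub y hy, fun x => ?_⟩
    have : List.count x [a] ≤ 1 := by
      simpa using List.count_le_length (a := x) (l := [a])
    constructor
    · exact fun h => Or.inl h
    · rintro (h | h)
      · exact h
      · omega
  | cons b t ih =>
    have hab : a ≤ b := (List.pairwise_cons.mp hs).1 b (by simp)
    have hs' : (b :: t).Pairwise (· ≤ ·) := (List.pairwise_cons.mp hs).2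
    have hzip : (a :: b :: t).zip (b :: t) = (a, b) :: ((b :: t).zip t) := rfl
    rw [hzip, List.foldl_cons]
    -- the membership characterisation of res under hub/hr: x ∈ res with x maximal ⇒ x is last
    have hlastmem : ∀ x, (∀ y ∈ res, y ≤ x) → (x ∈ res ↔ res.getLast? = some x) := by
      intro x hx
      constructor
      · intro hmem
        rcases List.eq_nil_or_concat res with h0 | ⟨ys, z, hz⟩
        · simp [h0] at hmem
        · subst hz
          simp only [List.concat_eq_append] at hr hub hx hmem ⊢
          rw [List.getLast?_concat]
          rcases List.mem_append.mp hmem with hy | hy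
          · have h1 : x < z := (List.pairwise_append.mp hr).2.2 x hy z (by simp)
            have h2 : z ≤ x := hx z (by simp)
            omega
          · simp at hy; simp [hy]
      · intro hl
        exact List.mem_of_getLast? hl
    by_cases hab2 : a = b
    · subst hab2
      by_cases hin : res.getLast? = some a
      · have hstep : dupScanStep res (a, a) = res := by
          simp [dupScanStep, hin]
        rw [hstep]
        obtain ⟨h1, h2, h3⟩ := ih a res hs' hr hub
        refine ⟨h1, fun y hy => by simpa using h2 y hy, fun x => ?_⟩
        rw [h3 x]
        have hamem : a ∈ res := (hlastmem a hub).mpr hin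
        by_cases hxa : x = a
        · subst hxa
          exact ⟨fun _ => Or.inl hamem, fun _ => Or.inl hamem⟩
        · have : List.count x (x :: a :: t) = List.count x (a :: t) + 1 := by simp
          have hc1 : List.count x (a :: a :: t) = List.count x (a :: t) := by
            simp [Ne.symm hxa]
          rw [hc1]
      · have hstep : dupScanStep res (a, a) = res ++ [a] := by
          simp [dupScanStep, hin]
        rw [hstep]
        have hnotmem : a ∉ res := fun h => hin ((hlastmem a hub).mp h)
        have hr' : (res ++ [a]).Pairwise (· < ·) := by
          rw [List.pairwise_append]
          refine ⟨hr, by simp, fun y hy z hz => ?_⟩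
          simp at hz
          have h1 := hub y hy
          have h2 : y ≠ a := fun h => hnotmem (h ▸ hy)
          omega
        have hub' : ∀ y ∈ res ++ [a], y ≤ a := by
          intro y hy
          rcases List.mem_append.mp hy with h | h
          · exact hub y h
          · simp at h; omega
        obtain ⟨h1, h2, h3⟩ := ih a (res ++ [a]) hs' hr' hub'
        refine ⟨h1, fun y hy => by simpa using h2 y hy, fun x => ?_⟩
        rw [h3 x]
        by_cases hxa : x = a
        · subst hxa
          have h2c : 2 ≤ List.count x (x :: x :: t) := by
            rw [List.count_cons_self, List.count_cons_self]; omega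
          exact ⟨fun _ => Or.inr h2c, fun _ => Or.inl (by simp)⟩
        · have hc1 : List.count x (a :: a :: t) = List.count x (a :: t) := by
            simp [Ne.symm hxa]
          have hm : x ∈ res ++ [a] ↔ x ∈ res := by simp [hxa]
          rw [hc1, hm]
    · have halt : a < b := lt_of_le_of_ne hab hab2
      have hstep : dupScanStep res (a, b) = res := by
        simp [dupScanStep, hab2]
      rw [hstep]
      have hub' : ∀ y ∈ res, y ≤ b := fun y hy => le_trans (hub y hy) hab
      obtain ⟨h1, h2, h3⟩ := ih b res hs' hr hub'
      refine ⟨h1, fun y hy => by simpa using h2 y hy, fun x => ?_⟩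
      rw [h3 x]
      have hanot : a ∉ b :: t := by
        intro h
        have hble : b ≤ a := by
          rcases List.mem_cons.mp h with h | h
          · omega
          · exact (List.pairwise_cons.mp hs').1 a h
        omega
      by_cases hxa : x = a
      · subst hxa
        have hc0 : List.count x (b :: t) = 0 := List.count_eq_zero.mpr hanot
        have hc1 : List.count x (x :: b :: t) = 1 := by
          rw [List.count_cons_self, hc0]
        simp [hc0, hc1]
      · have hc1 : List.count x (a :: b :: t) = List.count x (b :: t) := by
          simp [Ne.symm hxa]
        rw [hc1]

-- the scan over any nondecreasing list collects exactly the values occurring at least twice,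
-- in strictly increasing order
theorem dupB_scan_char (s : List Int) (hsp : s.Pairwise (· ≤ ·)) :
    ((s.zip s.tail).foldl dupScanStep []).Pairwise (· < ·) ∧
    ∀ x, x ∈ (s.zip s.tail).foldl dupScanStep [] ↔ 2 ≤ s.count x := by
  cases s with
  | nil => exact ⟨by simp, fun x => by simp⟩
  | cons a t =>
    obtain ⟨h1, _, h3⟩ := dupB_scan_inv t a [] hsp (by simp) (by simp)
    refine ⟨h1, fun x => ?_⟩
    rw [show (a :: t).tail = t from rfl, h3 x]
    simp

theorem duplicates_eq (n : Int) (arr : List Int) : duplicates n arr = duplicates_alt n arr := by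
  simp only [duplicates, duplicates_alt, PySem.List.slice_from_one]
  obtain ⟨hn, hm⟩ := dupA_loop_inv arr PySem.Set.empty PySem.Set.empty List.nodup_nil
  set ans := (arr.foldl dupStep (PySem.Set.empty, PySem.Set.empty)).2 with hans
  have hmem : ∀ x, x ∈ ans ↔ 2 ≤ arr.count x := by
    intro x
    rw [hm x]
    constructor
    · rintro (h | ⟨_, h | h⟩)
      · simp [PySem.Set.empty] at h
      · simp [PySem.Set.empty] at h
      · exact h
    · intro h
      exact Or.inr ⟨List.count_pos_iff.mp (by omega), Or.inr h⟩
  have hsperm : (PySem.List.sorted arr (fun x => x) false).Perm arr :=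
    PySem.List.sorted_perm arr (fun x => x) false
  obtain ⟨hscanp, hscanm⟩ := dupB_scan_char (PySem.List.sorted arr (fun x => x) false)
    (by simpa using PySem.List.sorted_pairwise arr (fun x => x))
  set res := ((PySem.List.sorted arr (fun x => x) false).zip
      (PySem.List.sorted arr (fun x => x) false).tail).foldl dupScanStep [] with hres
  have hcount : ∀ x, (PySem.List.sorted arr (fun x => x) false).count x = arr.count x :=
    fun x => hsperm.count_eq x
  have hresnodup : res.Nodup := hscanp.imp (fun {x y} h => ne_of_lt h)
  have hpermres : res.Perm ans := by
    apply (List.perm_ext_iff_of_nodup hresnodup hn).mpr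
    intro x
    rw [hscanm x, hmem x, hcount x]
  have hsorted_eq : PySem.List.sorted ans (fun x => x) false = res :=
    PySem.List.sorted_eq_of_perm_of_pairwise_lt ans res (fun x => x) hpermres hscanp
  by_cases h0 : ans = []
  · have hres0 : res = [] := by
      rw [h0] at hpermres
      exact hpermres.eq_nil
    rw [if_pos h0, if_pos hres0]
  · have hres0 : res ≠ [] := by
      intro h
      rw [h] at hpermres
      exact h0 hpermres.symm.eq_nil
    rw [if_neg h0, if_neg hres0, hsorted_eq]

-- ===== VERDICT (by name: the statement is the Claim_ definition above) =====
theorem duplicates_spec : Claim_equal_duplicates := by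
  intro n arr _
  exact duplicates_eq n arr
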